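-- pv_equiv track=rewrite | github.com/jmlarios/Fantasy_football_tracker | backend/src/services/laliga_api.py | _process_table_data
-- ===== SOURCE A (Python) =====
-- from typing import List, Dict, Optional
--
-- def _process_table_data(table_data: List[Dict]) -> List[Dict]:
--     """Process league table data from API response."""
--     processed_table = []
--
--     for entry in table_data:
--         processed_entry = {
--             'position': entry.get('intRank'),
--             'team': entry.get('strTeam'),
--             'played': entry.get('intPlayed'),
--             'won': entry.get('intWin'),
--             'drawn': entry.get('intDraw'),
--             'lost': entry.get('intLoss'),
--             'goals_for': entry.get('intGoalsFor'),
--             'goals_against': entry.get('intGoalsAgainst'),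
--             'goal_difference': entry.get('intGoalDifference'),
--             'points': entry.get('intPoints'),
--             'form': entry.get('strForm')
--         }
--         processed_table.append(processed_entry)
--
--     return processed_table
-- ===== SOURCE B (Python) =====
-- from typing import List, Dict, Optional
--
-- OUT_KEYS = ['position', 'team', 'played', 'won', 'drawn', 'lost',
--             'goals_for', 'goals_against', 'goal_difference', 'points', 'form']
-- API_INDEX = {'intRank': 0, 'strTeam': 1, 'intPlayed': 2, 'intWin': 3,
--              'intDraw': 4, 'intLoss': 5, 'intGoalsFor': 6, 'intGoalsAgainst': 7,
--              'intGoalDifference': 8, 'intPoints': 9, 'strForm': 10}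
--
-- def _process_table_data(table_data: List[Dict]) -> List[Dict]:
--     """Single pass over each entry's items, filling a fixed slot array."""
--     processed_table = []
--     for entry in table_data:
--         slots = [None] * len(OUT_KEYS)
--         for key, value in entry.items():
--             i = API_INDEX.get(key)
--             if i is not None:
--                 slots[i] = value
--         processed_table.append(dict(zip(OUT_KEYS, slots)))
--     return processed_table
-- ===== Notes on version B (the rewrite author's own statement) =====
-- stated objective: alternative
-- what changed: B inverts the iteration: instead of 11 schema-driven entry.get lookups per entry, it makes one pass over each entry's own items, dropping each value into a fixed 11-slot array via an API_INDEX key-to-slot table, then zips the output keys with the slots into the result dict.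
import Mathlib
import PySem

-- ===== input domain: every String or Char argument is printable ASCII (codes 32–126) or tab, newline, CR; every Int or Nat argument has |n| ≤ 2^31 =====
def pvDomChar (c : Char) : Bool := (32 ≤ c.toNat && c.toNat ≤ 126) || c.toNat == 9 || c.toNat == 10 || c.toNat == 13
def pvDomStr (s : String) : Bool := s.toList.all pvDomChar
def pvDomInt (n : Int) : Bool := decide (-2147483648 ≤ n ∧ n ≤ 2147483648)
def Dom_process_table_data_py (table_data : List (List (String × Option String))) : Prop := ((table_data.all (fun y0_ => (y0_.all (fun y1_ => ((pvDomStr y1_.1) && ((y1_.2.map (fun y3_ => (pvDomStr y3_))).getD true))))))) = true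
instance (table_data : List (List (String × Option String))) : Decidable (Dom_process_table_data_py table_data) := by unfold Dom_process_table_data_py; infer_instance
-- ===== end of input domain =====

-- B inverts the iteration: instead of 11 schema-driven dict lookups per entry, it makes ONE pass
-- over each entry's own items, dropping each value into a fixed slot array via an index table,
-- then zips the output keys with the slots (alternative decomposition; same O(n) cost).

-- ===== PORT A =====
def process_table_data_py (table_data : List (List (String × Option String))) : List (List (String × Option String)) :=
  -- processed_table = []; for entry in table_data: processed_entry = {...}; append
  table_data.foldl (fun processed_table entry =>
    processed_table ++ [[
      ("position", (PySem.Dict.mk entry).getD "intRank" none),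
      ("team", (PySem.Dict.mk entry).getD "strTeam" none),
      ("played", (PySem.Dict.mk entry).getD "intPlayed" none),
      ("won", (PySem.Dict.mk entry).getD "intWin" none),
      ("drawn", (PySem.Dict.mk entry).getD "intDraw" none),
      ("lost", (PySem.Dict.mk entry).getD "intLoss" none),
      ("goals_for", (PySem.Dict.mk entry).getD "intGoalsFor" none),
      ("goals_against", (PySem.Dict.mk entry).getD "intGoalsAgainst" none),
      ("goal_difference", (PySem.Dict.mk entry).getD "intGoalDifference" none),
      ("points", (PySem.Dict.mk entry).getD "intPoints" none),
      ("form", (PySem.Dict.mk entry).getD "strForm" none)]]) []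

-- ===== PORT B =====
def OUT_KEYS : List String :=
  ["position", "team", "played", "won", "drawn", "lost",
   "goals_for", "goals_against", "goal_difference", "points", "form"]

def API_INDEX : PySem.Dict String Int := PySem.Dict.mk
  [("intRank", 0), ("strTeam", 1), ("intPlayed", 2), ("intWin", 3),
   ("intDraw", 4), ("intLoss", 5), ("intGoalsFor", 6), ("intGoalsAgainst", 7),
   ("intGoalDifference", 8), ("intPoints", 9), ("strForm", 10)]

-- entry.items(): the dict's distinct keys in first-occurrence order with their first-bound values
-- (exact for the assoc-list dict representation, whose lookup is first-match)
def dictItemsAux : List String → List (String × Option String) → List (String × Option String)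
  | _, [] => []
  | seen, p :: t =>
    if seen.contains p.1 then dictItemsAux seen t
    else p :: dictItemsAux (p.1 :: seen) t

def dictItems (l : List (String × Option String)) : List (String × Option String) :=
  dictItemsAux [] l

-- the inner loop body: i = API_INDEX.get(key); if i is not None: slots[i] = value
def fillStep (slots : List (Option String)) (kv : String × Option String) : List (Option String) :=
  match API_INDEX.get? kv.1 with
  | some i => PySem.List.pySetD slots i kv.2
  | none => slots

def process_table_data_py_alt (table_data : List (List (String × Option String))) : List (List (String × Option String)) :=
  table_data.foldl (fun processed_table entry =>
    let slots := (dictItems entry).foldl fillStep (List.replicate OUT_KEYS.length none)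
    processed_table ++ [(PySem.Dict.ofList (OUT_KEYS.zip slots)).items]) []

-- ===== PRECONDITION & SPEC =====
def Spec_process_table_data_py (table_data : List (List (String × Option String))) (out : List (List (String × Option String))) : Prop := out = process_table_data_py_alt table_data
instance (table_data : List (List (String × Option String))) (out : List (List (String × Option String))) : Decidable (Spec_process_table_data_py table_data out) := by unfold Spec_process_table_data_py; infer_instance

-- ===== CLAIM (what is proved, stated in full; the proofs are below) =====
def Claim_equal_process_table_data_py : Prop := ∀ (table_data : List (List (String × Option String))), Dom_process_table_data_py table_data → Spec_process_table_data_py table_data (process_table_data_py table_data)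

-- ===== LEMMAS AND PROOFS =====

-- the API keys, in slot order
def KEYS : List String :=
  ["intRank", "strTeam", "intPlayed", "intWin", "intDraw", "intLoss",
   "intGoalsFor", "intGoalsAgainst", "intGoalDifference", "intPoints", "strForm"]

-- the value A's entry.get(k) produces: first match in the assoc list, else None
def valOf (entry : List (String × Option String)) (k : String) : Option String :=
  ((entry.find? (fun p => p.1 == k)).map Prod.snd).getD none

theorem getD_eq_valOf (entry : List (String × Option String)) (k : String) :
    (PySem.Dict.mk entry).getD k none = valOf entry k := rfl

theorem api_some (k : String) (i : Int) (h : API_INDEX.get? k = some i) :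
    ∃ n : Nat, n < KEYS.length ∧ i = (n : Int) ∧ KEYS[n]! = k := by
  have h' : Option.map Prod.snd (List.find? (fun q => q.1 == k) API_INDEX.items) = some i := h
  rcases Option.map_eq_some_iff.mp h' with ⟨p, hf, hp2⟩
  have hm : p ∈ ([("intRank", (0:Int)), ("strTeam", 1), ("intPlayed", 2), ("intWin", 3),
      ("intDraw", 4), ("intLoss", 5), ("intGoalsFor", 6), ("intGoalsAgainst", 7),
      ("intGoalDifference", 8), ("intPoints", 9), ("strForm", 10)] :
        List (String × Int)) := List.mem_of_find?_eq_some hf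
  have hpred : (p.1 == k) = true := by have := List.find?_some hf; simpa using this
  subst hp2
  fin_cases hm <;>
    first
    | exact ⟨0, by decide, by decide, by simpa using eq_of_beq hpred⟩
    | exact ⟨1, by decide, by decide, by simpa using eq_of_beq hpred⟩
    | exact ⟨2, by decide, by decide, by simpa using eq_of_beq hpred⟩
    | exact ⟨3, by decide, by decide, by simpa using eq_of_beq hpred⟩
    | exact ⟨4, by decide, by decide, by simpa using eq_of_beq hpred⟩
    | exact ⟨5, by decide, by decide, by simpa using eq_of_beq hpred⟩
    | exact ⟨6, by decide, by decide, by simpa using eq_of_beq hpred⟩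
    | exact ⟨7, by decide, by decide, by simpa using eq_of_beq hpred⟩
    | exact ⟨8, by decide, by decide, by simpa using eq_of_beq hpred⟩
    | exact ⟨9, by decide, by decide, by simpa using eq_of_beq hpred⟩
    | exact ⟨10, by decide, by decide, by simpa using eq_of_beq hpred⟩

theorem api_keys (j : Nat) (hj : j < KEYS.length) :
    API_INDEX.get? (KEYS[j]!) = some (j : Int) := by
  have hj' : j < 11 := by simpa [KEYS] using hj
  interval_cases j <;> decide

theorem keys_inj (a b : Nat) (ha : a < 11) (hb : b < 11) (h : KEYS[a]! = KEYS[b]!) : a = b := by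
  have H : ∀ a, a < 11 → ∀ b, b < 11 → KEYS[a]! = KEYS[b]! → a = b := by decide
  exact H a ha b hb h

theorem fillStep_length (slots : List (Option String)) (kv : String × Option String) :
    (fillStep slots kv).length = slots.length := by
  unfold fillStep
  cases API_INDEX.get? kv.1 with
  | none => rfl
  | some i =>
      simp only [PySem.List.pySetD, PySem.List.pySet?, PySem.List.pyIdx?]
      split_ifs <;> simp

theorem fill_length (l : List (String × Option String)) (slots : List (Option String)) :
    (l.foldl fillStep slots).length = slots.length := by
  induction l generalizing slots with
  | nil => rfl
  | cons p t ih => rw [List.foldl_cons, ih, fillStep_length]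

theorem fill_get (l : List (String × Option String)) (slots : List (Option String))
    (hnd : (l.map Prod.fst).Nodup) (hlen : slots.length = 11) (j : Nat) (hj : j < 11) :
    (l.foldl fillStep slots)[j]? =
      match l.find? (fun p => p.1 == KEYS[j]!) with
      | some p => some p.2
      | none => slots[j]? := by
  induction l generalizing slots with
  | nil => rfl
  | cons p t ih =>
    obtain ⟨k, v⟩ := p
    simp only [List.map_cons, List.nodup_cons] at hnd
    obtain ⟨hk_notin, hnd_t⟩ := hnd
    rw [List.foldl_cons]
    cases hA : API_INDEX.get? k with
    | none =>
      have hkne : (k == KEYS[j]!) = false := by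
        apply beq_false_of_ne
        intro hkk
        rw [hkk, api_keys j (by simpa [KEYS] using hj)] at hA
        simp at hA
      have hstep : fillStep slots (k, v) = slots := by simp [fillStep, hA]
      rw [hstep, ih slots hnd_t hlen, List.find?_cons_of_neg (by simpa using ne_of_beq_false hkne)]
    | some i =>
      obtain ⟨n, hn, hin, hkey⟩ := api_some k i hA
      have hn11 : n < 11 := by simpa [KEYS] using hn
      have hstep : fillStep slots (k, v) = slots.set n v := by
        simp only [fillStep, hA, PySem.List.pySetD, PySem.List.pySet?, PySem.List.pyIdx?, hlen,
          hin]
        rw [if_pos (by positivity), if_pos (by exact_mod_cast hn11)]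
        simp
      rw [hstep, ih _ hnd_t (by simp [hlen])]
      by_cases hkk : k = KEYS[j]!
      · -- the head is the key for slot j; no later pair has this key
        have hnj : n = j := keys_inj n j hn11 hj (by rw [hkey, hkk])
        subst hnj
        have hbeq : (k == KEYS[n]!) = true := beq_iff_eq.mpr hkk
        have hnone : t.find? (fun p => p.1 == KEYS[n]!) = none := by
          rw [List.find?_eq_none]
          intro q hq hq1
          exact hk_notin (by
            rw [← hkk] at hq1
            exact (List.mem_map.mpr ⟨q, hq, eq_of_beq hq1⟩))
        rw [hnone, List.find?_cons_of_pos (by simpa using hbeq)]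
        simp [hlen, hn11]
      · have hbeq : (k == KEYS[j]!) = false := beq_false_of_ne hkk
        have hnj : n ≠ j := fun hnj => hkk (by rw [← hkey, hnj])
        rw [List.find?_cons_of_neg (by simpa using ne_of_beq_false hbeq)]
        simp [hnj]

theorem nodup_dictItemsAux (seen : List String) (l : List (String × Option String)) :
    ((dictItemsAux seen l).map Prod.fst).Nodup ∧
      ∀ x ∈ (dictItemsAux seen l).map Prod.fst, seen.contains x = false := by
  induction l generalizing seen with
  | nil => simp [dictItemsAux]
  | cons p t ih =>
    rw [dictItemsAux]
    split
    · exact ih seen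
    · rename_i hns
      obtain ⟨ih1, ih2⟩ := ih (p.1 :: seen)
      refine ⟨List.nodup_cons.mpr ⟨?_, ih1⟩, ?_⟩
      · intro hmem
        have := ih2 _ hmem
        simp at this
      · intro x hx
        rw [List.map_cons] at hx
        rcases List.mem_cons.mp hx with h | h
        · subst h; simpa using hns
        · have h2 := ih2 _ h
          simp only [List.contains_cons, Bool.or_eq_false_iff] at h2
          exact h2.2

theorem nodup_dictItems (l : List (String × Option String)) :
    ((dictItems l).map Prod.fst).Nodup :=
  (nodup_dictItemsAux [] l).1

theorem find?_dictItemsAux (seen : List String) (l : List (String × Option String)) (k : String)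
    (hk : seen.contains k = false) :
    (dictItemsAux seen l).find? (fun p => p.1 == k) = l.find? (fun p => p.1 == k) := by
  induction l generalizing seen with
  | nil => rfl
  | cons p t ih =>
    rw [dictItemsAux]
    by_cases hpk : (p.1 == k) = true
    · have hk1 : seen.contains p.1 = false := by rwa [eq_of_beq hpk]
      rw [if_neg (by simpa using hk1), List.find?_cons_of_pos (by simpa using hpk),
        List.find?_cons_of_pos (by simpa using hpk)]
    · rw [List.find?_cons_of_neg (by simpa using hpk)]
      split
      · exact ih seen hk
      · rw [List.find?_cons_of_neg (by simpa using hpk)]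
        refine ih (p.1 :: seen) ?_
        have h1 : ¬ k = p.1 := fun h => hpk (by simp [h])
        have h2 : k ∉ seen := by simpa using hk
        simp [h1, h2]

theorem find?_dictItems (l : List (String × Option String)) (k : String) :
    (dictItems l).find? (fun p => p.1 == k) = l.find? (fun p => p.1 == k) :=
  find?_dictItemsAux [] l k rfl

theorem slots_eq (entry : List (String × Option String)) :
    (dictItems entry).foldl fillStep (List.replicate OUT_KEYS.length none) =
      KEYS.map (valOf entry) := by
  apply List.ext_getElem?
  intro j
  by_cases hj : j < 11
  · rw [fill_get _ _ (nodup_dictItems entry) (by simp [OUT_KEYS]) j hj,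
      find?_dictItems]
    have hrep : (List.replicate OUT_KEYS.length (none : Option String))[j]? = some none := by
      show (List.replicate 11 (none : Option String))[j]? = some none
      rw [List.getElem?_replicate]
      simp [hj]
    have hmap : (KEYS.map (valOf entry))[j]? = some (valOf entry (KEYS[j]!)) := by
      have hj' : j < KEYS.length := by simpa [KEYS] using hj
      simp [hj']
    rw [hmap, hrep]
    unfold valOf
    cases entry.find? (fun p => p.1 == KEYS[j]!) <;> simp
  · have h1 : ((dictItems entry).foldl fillStep (List.replicate OUT_KEYS.length none)).length = 11 := by
      rw [fill_length]; simp [OUT_KEYS]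
    rw [List.getElem?_eq_none (by omega), List.getElem?_eq_none (by simp [KEYS]; omega)]

theorem ofList_items (ps : List (String × Option String))
    (h : (ps.map Prod.fst).Nodup) : (PySem.Dict.ofList ps).items = ps := by
  have := PySem.Dict.items_foldl_insert_fresh ps Prod.fst Prod.snd PySem.Dict.empty
    (fun a _ => PySem.Dict.contains_empty _) h
  simpa [PySem.Dict.ofList, PySem.Dict.update] using this

theorem row_eq (entry : List (String × Option String)) :
    (PySem.Dict.ofList (OUT_KEYS.zip
        ((dictItems entry).foldl fillStep (List.replicate OUT_KEYS.length none)))).items =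
      [("position", (PySem.Dict.mk entry).getD "intRank" none),
       ("team", (PySem.Dict.mk entry).getD "strTeam" none),
       ("played", (PySem.Dict.mk entry).getD "intPlayed" none),
       ("won", (PySem.Dict.mk entry).getD "intWin" none),
       ("drawn", (PySem.Dict.mk entry).getD "intDraw" none),
       ("lost", (PySem.Dict.mk entry).getD "intLoss" none),
       ("goals_for", (PySem.Dict.mk entry).getD "intGoalsFor" none),
       ("goals_against", (PySem.Dict.mk entry).getD "intGoalsAgainst" none),
       ("goal_difference", (PySem.Dict.mk entry).getD "intGoalDifference" none),
       ("points", (PySem.Dict.mk entry).getD "intPoints" none),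
       ("form", (PySem.Dict.mk entry).getD "strForm" none)] := by
  rw [slots_eq, ofList_items]
  · simp only [getD_eq_valOf, OUT_KEYS, KEYS, List.map]
    rfl
  · rw [List.map_fst_zip (by simp [OUT_KEYS, KEYS])]
    decide

-- ===== VERDICT (by name: the statement is the Claim_ definition above) =====
theorem process_table_data_py_spec : Claim_equal_process_table_data_py := by
  intro table_data _
  unfold Spec_process_table_data_py process_table_data_py process_table_data_py_alt
  rw [PySem.List.foldl_append_singleton_eq_map, PySem.List.foldl_append_singleton_eq_map]
  exact List.map_congr_left (fun entry _ => ((row_eq entry).symm))
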